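-- pv_equiv track=rewrite | github.com/thoriumrobot/GenDATA | rl_annotation_type_training.py | _is_related_category
-- ===== SOURCE A (Python) =====
-- def _is_related_category(pred: str, true: str) -> bool:
--     """Check if prediction is in related category to ground truth"""
--     positive_types = ["@Positive", "@NonNegative", "@GTENegativeOne"]
--     length_types = ["@MinLen", "@ArrayLen", "@LengthOf", "@LTLengthOf", "@GTLengthOf"]
--     index_types = ["@IndexFor", "@SearchIndexFor", "@SearchIndexBottom"]
--
--     categories = [positive_types, length_types, index_types]
--
--     for category in categories:
--         if pred in category and true in category:
--             return True
--     return False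
-- ===== SOURCE B (Python) =====
-- _POS = ["@Positive", "@NonNegative", "@GTENegativeOne"]
-- _LEN = ["@MinLen", "@ArrayLen", "@LengthOf", "@LTLengthOf", "@GTLengthOf"]
-- _IDX = ["@IndexFor", "@SearchIndexFor", "@SearchIndexBottom"]
--
-- # The relatedness relation materialised extensionally: the set of all ordered
-- # pairs of types drawn from the same category.
-- _RELATED = {(x, y) for c in (_POS, _LEN, _IDX) for x in c for y in c}
--
-- def _is_related_category(pred: str, true: str) -> bool:
--     return (pred, true) in _RELATED
-- ===== Notes on version B (the rewrite author's own statement) =====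
-- stated objective: alternative
-- what changed: Instead of scanning each category list for both strings, B precomputes the relation extensionally as a set of all ordered same-category pairs and answers with a single membership test of (pred, true).
import Mathlib
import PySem

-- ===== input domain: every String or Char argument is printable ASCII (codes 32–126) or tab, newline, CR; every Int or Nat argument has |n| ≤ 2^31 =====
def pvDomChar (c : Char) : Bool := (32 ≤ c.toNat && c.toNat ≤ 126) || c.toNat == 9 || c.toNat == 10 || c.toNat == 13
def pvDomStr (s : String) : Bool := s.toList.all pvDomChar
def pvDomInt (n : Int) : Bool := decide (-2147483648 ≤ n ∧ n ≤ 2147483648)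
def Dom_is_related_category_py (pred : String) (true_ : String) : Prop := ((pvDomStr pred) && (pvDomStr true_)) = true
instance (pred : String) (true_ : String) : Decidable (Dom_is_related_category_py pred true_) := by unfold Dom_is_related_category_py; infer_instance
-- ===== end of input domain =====

set_option maxRecDepth 4096


-- B precomputes the relatedness relation extensionally as the set of all ordered same-category
-- pairs and answers with one membership test of (pred, true_) (alternative; same result).

-- ===== PORT A =====
-- 'for category in categories: if pred in category and true in category: return True' / 'return False'
def isRelatedLoopA (cats : List (List String)) (pred : String) (true_ : String) : Bool :=
  match cats with
  | [] => false
  | category :: rest =>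
    if category.contains pred && category.contains true_ then true
    else isRelatedLoopA rest pred true_

def is_related_category_py (pred : String) (true_ : String) : Bool :=
  let positive_types := ["@Positive", "@NonNegative", "@GTENegativeOne"]
  let length_types := ["@MinLen", "@ArrayLen", "@LengthOf", "@LTLengthOf", "@GTLengthOf"]
  let index_types := ["@IndexFor", "@SearchIndexFor", "@SearchIndexBottom"]
  let categories := [positive_types, length_types, index_types]
  isRelatedLoopA categories pred true_

-- ===== PORT B =====
-- _RELATED = {(x, y) for c in (_POS, _LEN, _IDX) for x in c for y in c}
def relatedPairsB : PySem.Set (String × String) :=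
  PySem.Set.ofList
    ((([["@Positive", "@NonNegative", "@GTENegativeOne"],
        ["@MinLen", "@ArrayLen", "@LengthOf", "@LTLengthOf", "@GTLengthOf"],
        ["@IndexFor", "@SearchIndexFor", "@SearchIndexBottom"]] : List (List String)).flatMap
      (fun c => c.flatMap (fun x => c.map (fun y => (x, y))))))

def is_related_category_py_alt (pred : String) (true_ : String) : Bool :=
  PySem.Set.contains relatedPairsB (pred, true_)

-- ===== PRECONDITION & SPEC =====
def Spec_is_related_category_py (pred : String) (true_ : String) (out : Bool) : Prop := out = is_related_category_py_alt pred true_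
instance (pred : String) (true_ : String) (out : Bool) : Decidable (Spec_is_related_category_py pred true_ out) := by unfold Spec_is_related_category_py; infer_instance

-- ===== CLAIM =====
def Claim_equal_is_related_category_py : Prop := ∀ (pred : String) (true_ : String), Dom_is_related_category_py pred true_ → Spec_is_related_category_py pred true_ (is_related_category_py pred true_)

-- ===== LEMMAS AND PROOFS =====

-- the 11 annotation-type keys appearing in either port (proof helper)
def KEYS : List String := ["@Positive", "@NonNegative", "@GTENegativeOne",
  "@MinLen", "@ArrayLen", "@LengthOf", "@LTLengthOf", "@GTLengthOf",
  "@IndexFor", "@SearchIndexFor", "@SearchIndexBottom"]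

theorem both_mem_eq : ∀ p ∈ KEYS, ∀ t ∈ KEYS,
    is_related_category_py p t = is_related_category_py_alt p t := by decide

theorem pairs_comps_keys : ∀ p ∈ relatedPairsB, p.1 ∈ KEYS ∧ p.2 ∈ KEYS := by decide

theorem B_false_of_not_key (pred true_ : String) (h : pred ∉ KEYS ∨ true_ ∉ KEYS) :
    is_related_category_py_alt pred true_ = false := by
  unfold is_related_category_py_alt
  rw [Bool.eq_false_iff]
  intro hc
  have hmem : (pred, true_) ∈ relatedPairsB := by
    simpa [PySem.Set.contains] using hc
  have := pairs_comps_keys _ hmem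
  rcases h with h | h
  · exact h this.1
  · exact h this.2

theorem A_false_of_not_key (pred true_ : String) (h : pred ∉ KEYS ∨ true_ ∉ KEYS) :
    is_related_category_py pred true_ = false := by
  unfold is_related_category_py isRelatedLoopA
  simp only [KEYS, List.mem_cons, List.not_mem_nil, not_or] at h
  rcases h with h | h <;>
    · obtain ⟨h1,h2,h3,h4,h5,h6,h7,h8,h9,h10,h11,-⟩ := h
      simp [isRelatedLoopA, List.contains, List.elem,
        beq_eq_false_iff_ne.mpr h1, beq_eq_false_iff_ne.mpr h2, beq_eq_false_iff_ne.mpr h3,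
        beq_eq_false_iff_ne.mpr h4, beq_eq_false_iff_ne.mpr h5, beq_eq_false_iff_ne.mpr h6,
        beq_eq_false_iff_ne.mpr h7, beq_eq_false_iff_ne.mpr h8, beq_eq_false_iff_ne.mpr h9,
        beq_eq_false_iff_ne.mpr h10, beq_eq_false_iff_ne.mpr h11]

-- ===== VERDICT =====
theorem is_related_category_py_spec : Claim_equal_is_related_category_py := by
  intro pred true_ _
  unfold Spec_is_related_category_py
  by_cases hp : pred ∈ KEYS
  · by_cases ht : true_ ∈ KEYS
    · exact both_mem_eq pred hp true_ ht
    · rw [A_false_of_not_key pred true_ (Or.inr ht), B_false_of_not_key pred true_ (Or.inr ht)]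
  · rw [A_false_of_not_key pred true_ (Or.inl hp), B_false_of_not_key pred true_ (Or.inl hp)]
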